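-- pv_equiv track=rewrite | github.com/JonathanMary/advent_of_code_24 | aoc_day_9.py | find_space
-- ===== SOURCE A (Python) =====
-- def find_space(disk, length):
--     size = 0
--     start = 0
--     for i, x in enumerate(disk):
--         if x == ".":
--             size += 1
--             if size == 1:
--                 start = i
--             if size == length:
--                 return start
--         if x != ".":
--             size = 0
--     return 0
-- ===== SOURCE B (Python) =====
-- def find_space(disk, length):
--     if length < 1 or length > len(disk):
--         return 0
--     target = ["."] * length
--     for i in range(len(disk) - length + 1):
--         if disk[i:i+length] == target:
--             return i
--     return 0
-- ===== Notes on version B (the rewrite author's own statement) =====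
-- stated objective: simpler
-- what changed: Replaces the incremental run-length counter with a direct scan of candidate start positions comparing a fixed window slice against a list of dots.
import Mathlib
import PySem

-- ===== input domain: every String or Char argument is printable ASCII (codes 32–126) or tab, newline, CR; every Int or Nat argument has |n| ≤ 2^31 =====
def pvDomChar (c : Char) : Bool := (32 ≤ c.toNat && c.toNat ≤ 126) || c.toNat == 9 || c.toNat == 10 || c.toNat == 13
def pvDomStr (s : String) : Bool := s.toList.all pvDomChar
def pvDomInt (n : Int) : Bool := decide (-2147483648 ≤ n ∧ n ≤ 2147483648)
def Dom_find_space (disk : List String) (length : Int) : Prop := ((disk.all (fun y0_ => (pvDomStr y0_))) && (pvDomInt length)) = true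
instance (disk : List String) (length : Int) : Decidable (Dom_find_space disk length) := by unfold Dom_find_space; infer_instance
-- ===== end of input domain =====

-- B replaces A's incremental run-length counter with a direct scan of candidate
-- start positions comparing a fixed-size window slice against a list of dots (simpler).


-- ===== PORT A =====
-- loop over enumerate(disk) with early return; state (size, start)
def aLoop (length : Int) : List String → Int → Int → Int → Int
  | [], _i, _size, _start => 0
  | x :: xs, i, size, start =>
    if x = "." then
      let size1 := size + 1
      let start1 := if size1 = 1 then i else start
      if size1 = length then start1
      else aLoop length xs (i + 1) size1 start1
    else
      aLoop length xs (i + 1) 0 start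

def find_space (disk : List String) (length : Int) : Int :=
  aLoop length disk 0 0 0

-- ===== PORT B =====
-- for i in range(len(disk)-length+1): if disk[i:i+length] == target: return i
def bLoop (disk target : List String) (length : Int) : List Int → Int
  | [] => 0
  | i :: rest =>
      if PySem.List.slice disk (some i) (some (i + length)) = target then i
      else bLoop disk target length rest

def find_space_alt (disk : List String) (length : Int) : Int :=
  if length < 1 then 0
  else if (disk.length : Int) < length then 0
  else
    bLoop disk (List.replicate length.toNat ".") length
      (PySem.List.pyRange 0 ((disk.length : Int) - length + 1) 1)

-- ===== PRECONDITION & SPEC =====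
def Spec_find_space (disk : List String) (length : Int) (out : Int) : Prop := out = find_space_alt disk length
instance (disk : List String) (length : Int) (out : Int) : Decidable (Spec_find_space disk length out) := by unfold Spec_find_space; infer_instance

-- ===== CLAIM (what is proved, stated in full; the proofs are below) =====
def Claim_equal_find_space : Prop := ∀ (disk : List String) (length : Int), Dom_find_space disk length → Spec_find_space disk length (find_space disk length)

-- ===== LEMMAS AND PROOFS =====

-- "a window of k dots starts at s"
def win (disk : List String) (k s : Nat) : Bool :=
  decide ((disk.drop s).take k = List.replicate k ".")

-- first index ≥ s carrying a window of k dots, else 0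
def fw (disk : List String) (k s : Nat) : Int :=
  match (List.range' s (disk.length - s)).find? (win disk k) with
  | some j => (j : Int)
  | none => 0

lemma win_bound {disk : List String} {k s : Nat} (hk1 : 1 ≤ k) (h : win disk k s = true) :
    s + k ≤ disk.length := by
  unfold win at h
  have h' := of_decide_eq_true h
  have := congrArg List.length h'
  simp [List.length_take, List.length_drop] at this
  omega

lemma fw_none {disk : List String} {k s : Nat}
    (h : ∀ j, s ≤ j → j < disk.length → win disk k j = false) :
    fw disk k s = 0 := by
  unfold fw
  rw [List.find?_eq_none.mpr]
  intro j hj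
  obtain ⟨h1, h2⟩ := List.mem_range'_1.mp hj
  have hjn : j < disk.length := by omega
  simp [h j h1 hjn]

lemma fw_self {disk : List String} {k s : Nat}
    (hs : s < disk.length) (h : win disk k s = true) :
    fw disk k s = (s : Int) := by
  unfold fw
  have hlen : disk.length - s = (disk.length - s - 1) + 1 := by omega
  rw [hlen, List.range'_succ, List.find?_cons_of_pos h]

lemma fw_skip {disk : List String} {k s s' : Nat}
    (hss : s ≤ s') (hs' : s' ≤ disk.length)
    (h : ∀ j, s ≤ j → j < s' → win disk k j = false) :
    fw disk k s = fw disk k s' := by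
  unfold fw
  have hsplit : List.range' s (disk.length - s) =
      List.range' s (s' - s) ++ List.range' s' (disk.length - s') := by
    have hr := @List.range'_append s (s' - s) (disk.length - s') 1
    rw [show s + 1 * (s' - s) = s' by omega] at hr
    rw [show (s' - s) + (disk.length - s') = disk.length - s by omega] at hr
    exact hr.symm
  rw [hsplit, List.find?_append, List.find?_eq_none.mpr, Option.none_or]
  intro j hj
  obtain ⟨h1, h2⟩ := List.mem_range'_1.mp hj
  have hjs : j < s' := by omega
  simp [h j h1 hjs]

-- main invariant lemma for A's loop
lemma aLoop_eq (disk : List String) (length : Int) (hlen : 1 ≤ length) :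
    ∀ (xs : List String) (i size : Nat) (st : Int),
      xs = disk.drop i → size ≤ i → i ≤ disk.length →
      disk.drop (i - size) = List.replicate size "." ++ xs →
      (size : Int) < length →
      (1 ≤ size → st = (i : Int) - size) →
      aLoop length xs i size st = fw disk length.toNat (i - size) := by
  intro xs
  induction xs with
  | nil =>
    intro i size st hxs hsi hin _hrun hsz _hst
    have hni : i = disk.length := by
      have := congrArg List.length hxs
      simp [List.length_drop] at this
      omega
    rw [fw_none]
    · rfl
    · intro j hj hjn
      by_contra hwin
      have hw : win disk length.toNat j = true := by
        cases h : win disk length.toNat j with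
        | false => exact absurd h hwin
        | true => rfl
      have hb := win_bound (by omega) hw
      have hk : (length.toNat : Int) = length := Int.toNat_of_nonneg (by omega)
      omega
  | cons x xs' ih =>
    intro i size st hxs hsi hin hrun hsz hst
    have hiless : i < disk.length := by
      have := congrArg List.length hxs
      simp [List.length_drop] at this
      omega
    have hxi : disk[i]? = some x := by
      have h0 : (disk.drop i)[0]? = some x := by rw [← hxs]; rfl
      rw [List.getElem?_drop] at h0
      simpa using h0
    have hxs' : xs' = disk.drop (i + 1) := by
      have hdd : (disk.drop i).drop 1 = disk.drop (i + 1) := by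
        rw [List.drop_drop]
      rw [← hdd, ← hxs]
      rfl
    have hk : (length.toNat : Int) = length := Int.toNat_of_nonneg (by omega)
    show aLoop length (x :: xs') i size st = _
    unfold aLoop
    by_cases hx : x = "."
    · simp only [if_pos hx]
      have hrun2 : disk.drop (i - size) = List.replicate (size + 1) "." ++ xs' := by
        rw [hrun, hx, List.replicate_succ']
        simp
      have hrun' : disk.drop (i + 1 - (size + 1)) =
          List.replicate (size + 1) "." ++ xs' := by
        rw [show i + 1 - (size + 1) = i - size by omega]
        exact hrun2
      by_cases heq : (size : Int) + 1 = length
      · simp only [if_pos heq]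
        have hkk : length.toNat = size + 1 := by omega
        have hwin : win disk length.toNat (i - size) = true := by
          unfold win
          apply decide_eq_true
          rw [hrun2, hkk, List.take_left' (by simp)]
        rw [fw_self (by omega) hwin]
        by_cases hz : size = 0
        · subst hz
          simp
        · have h1 : ¬ ((size : Int) + 1 = 1) := by omega
          simp only [if_neg h1]
          rw [hst (by omega)]
          omega
      · simp only [if_neg heq]
        have hrec := ih (i + 1) (size + 1)
          (if (size : Int) + 1 = 1 then (i : Int) else st)
          hxs' (by omega) (by omega) hrun' (by push_cast; omega)
          (by
            intro _
            by_cases hz : size = 0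
            · subst hz; simp
            · have h1 : ¬ ((size : Int) + 1 = 1) := by omega
              rw [if_neg h1, hst (by omega)]
              push_cast
              ring)
        rw [show i + 1 - (size + 1) = i - size by omega] at hrec
        push_cast at hrec
        exact hrec
    · simp only [if_neg hx]
      have hrec := ih (i + 1) 0 st hxs' (by omega) (by omega)
        (by simpa using hxs'.symm) (by omega) (by omega)
      rw [show i + 1 - 0 = i + 1 from rfl] at hrec
      push_cast at hrec
      rw [hrec]
      refine (fw_skip (by omega) (by omega) ?_).symm
      intro j hj hji
      by_contra hwin
      have hw' := of_decide_eq_true (by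
        cases h : win disk length.toNat j with
        | false => exact absurd h hwin
        | true => unfold win at h; exact h)
      have hij : i - j < length.toNat := by omega
      have h1 : ((disk.drop j).take length.toNat)[i - j]? = some x := by
        rw [List.getElem?_take]
        simp only [if_pos hij]
        rw [List.getElem?_drop, show j + (i - j) = i by omega]
        exact hxi
      rw [hw'] at h1
      rw [List.getElem?_replicate, if_pos hij] at h1
      exact hx (by injection h1 with h3; exact h3.symm)

-- A for nonpositive length always returns 0
lemma aLoop_nonpos (length : Int) (h : length ≤ 0) :
    ∀ (xs : List String) (i size st : Int), 0 ≤ size →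
      aLoop length xs i size st = 0 := by
  intro xs
  induction xs with
  | nil => intro i size st _; rfl
  | cons x xs' ih =>
    intro i size st hs
    unfold aLoop
    by_cases hx : x = "."
    · simp only [if_pos hx]
      have hne : ¬ (size + 1 = length) := by omega
      simp only [if_neg hne]
      exact ih _ _ _ (by omega)
    · simp only [if_neg hx]
      exact ih _ _ _ (by omega)

-- B's inner loop over natural-number indices is the first-window search
lemma bLoop_eq (disk : List String) (length : Int) (hlen : 1 ≤ length) :
    ∀ (l : List Nat),
      bLoop disk (List.replicate length.toNat ".") length (List.map (fun j : Nat => (j : Int)) l) =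
        (match l.find? (win disk length.toNat) with
         | some j => (j : Int)
         | none => 0) := by
  intro l
  induction l with
  | nil => rfl
  | cons j rest ih =>
    simp only [List.map_cons]
    unfold bLoop
    have hslice : PySem.List.slice disk (some (j : Int)) (some ((j : Int) + length)) =
        (disk.drop j).take length.toNat := by
      rw [show ((j : Int) + length) = ((j : Int) + (length.toNat : Int)) by
        rw [Int.toNat_of_nonneg (by omega)]]
      exact PySem.List.slice_natCast_add disk j length.toNat
    rw [hslice]
    by_cases hw : win disk length.toNat j = true
    · rw [if_pos (of_decide_eq_true (by unfold win at hw; exact hw)),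
        List.find?_cons_of_pos hw]
    · have hne : ¬ ((disk.drop j).take length.toNat = List.replicate length.toNat ".") := by
        intro hcontra; exact hw (decide_eq_true hcontra)
      rw [if_neg hne, List.find?_cons_of_neg hw, ih]

lemma find_space_alt_eq_fw (disk : List String) (length : Int) (hlen : 1 ≤ length) :
    find_space_alt disk length = fw disk length.toNat 0 := by
  unfold find_space_alt
  rw [if_neg (by omega)]
  have hk : (length.toNat : Int) = length := Int.toNat_of_nonneg (by omega)
  by_cases hkn : length.toNat ≤ disk.length
  · rw [if_neg (by omega)]
    have hm : (disk.length : Int) - length + 1 =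
        ((disk.length - length.toNat + 1 : Nat) : Int) := by push_cast; omega
    rw [hm, PySem.List.pyRange_zero_natCast,
      bLoop_eq disk length hlen (List.range (disk.length - length.toNat + 1))]
    unfold fw
    have hsplit : List.range' 0 (disk.length - 0) =
        List.range (disk.length - length.toNat + 1) ++
          List.range' (disk.length - length.toNat + 1) (length.toNat - 1) := by
      rw [List.range_eq_range']
      have hr := @List.range'_append 0 (disk.length - length.toNat + 1) (length.toNat - 1) 1
      rw [show 0 + 1 * (disk.length - length.toNat + 1) = disk.length - length.toNat + 1 by
        omega] at hr
      rw [show (disk.length - length.toNat + 1) + (length.toNat - 1) = disk.length - 0 by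
        omega] at hr
      exact hr.symm
    rw [hsplit, List.find?_append]
    have hnone : (List.range' (disk.length - length.toNat + 1) (length.toNat - 1)).find?
        (win disk length.toNat) = none := by
      rw [List.find?_eq_none]
      intro j hj
      obtain ⟨h1, h2⟩ := List.mem_range'_1.mp hj
      intro hw
      have := win_bound (by omega) hw
      omega
    rw [hnone, Option.or_none]
  · rw [if_pos (by omega), fw_none]
    intro j _ hjn
    by_contra hwin
    have hw : win disk length.toNat j = true := by
      cases h : win disk length.toNat j with
      | false => exact absurd h hwin
      | true => rfl
    have := win_bound (by omega) hw
    omega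

-- ===== VERDICT (by name: the statement is the Claim_ definition above) =====
theorem find_space_spec : Claim_equal_find_space := by
  intro disk length _dom
  unfold Spec_find_space
  by_cases h : length < 1
  · unfold find_space_alt
    rw [if_pos h]
    unfold find_space
    exact aLoop_nonpos length (by omega) disk 0 0 0 (by omega)
  · have hlen : 1 ≤ length := by omega
    rw [find_space_alt_eq_fw disk length hlen]
    unfold find_space
    have hmain := aLoop_eq disk length hlen disk 0 0 0
      rfl (by omega) (by omega) rfl (by omega) (by omega)
    simpa using hmain
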